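-- pv_equiv track=rewrite | github.com/ViNguyen3/CS5990-Assignment1 | hw1.py | build_term_matrix
-- ===== SOURCE A (Python) =====
-- def build_term_matrix(documents):
--     unique_words = set()
--
--     for doc in documents:
--         words = doc.split()  # Split by spaces
--         unique_words.update(words)
--
--     unique_words = sorted(unique_words)  # Keep a consistent order
--     word_index = {word: i for i, word in enumerate(unique_words)}
--
--     term_matrix = []
--     for doc in documents:
--         vector = [0] * len(unique_words)
--         words = doc.split()
--         for word in words:
--             if word in word_index:
--                 vector[word_index[word]] = 1  # Binary encoding
--         term_matrix.append(vector)
--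
--     return term_matrix
-- ===== SOURCE B (Python) =====
-- def build_term_matrix(documents):
--     unique_words = sorted({word for doc in documents for word in doc.split()})
--     matrix = []
--     for doc in documents:
--         doc_words = set(doc.split())
--         matrix.append([1 if w in doc_words else 0 for w in unique_words])
--     return matrix
-- ===== Notes on version B (the rewrite author's own statement) =====
-- stated objective: alternative
-- what changed: The word_index dict and per-row zero-vector scatter-writes are replaced by a per-document word set with the inner loop ranging over the sorted vocabulary, emitting each row as a membership comprehension.
import Mathlib
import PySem

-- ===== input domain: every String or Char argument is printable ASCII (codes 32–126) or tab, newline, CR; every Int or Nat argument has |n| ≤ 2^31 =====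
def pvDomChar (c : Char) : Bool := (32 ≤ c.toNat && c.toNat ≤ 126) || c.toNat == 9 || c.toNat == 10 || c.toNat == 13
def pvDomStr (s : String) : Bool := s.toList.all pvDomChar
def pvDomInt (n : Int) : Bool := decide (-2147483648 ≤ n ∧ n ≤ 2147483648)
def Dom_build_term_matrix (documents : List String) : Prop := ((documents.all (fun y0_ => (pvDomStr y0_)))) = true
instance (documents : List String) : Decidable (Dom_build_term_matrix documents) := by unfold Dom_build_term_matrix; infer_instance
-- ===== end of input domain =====

-- B drops A's word_index dict and per-row scatter-writes into a zero vector: each row is a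
-- membership scan of the sorted vocabulary against the document's word set (alternative decomposition).

-- ===== PORT A =====
def build_term_matrix (documents : List String) : List (List Int) :=
  let unique0 : PySem.Set String :=
    documents.foldl (fun s doc => PySem.Set.update s (PySem.Str.split₀ doc)) PySem.Set.empty
  let unique_words : List String := PySem.List.sorted unique0 (fun w => w) false
  let word_index : PySem.Dict String Int :=
    (PySem.List.enumerate unique_words).foldl (fun d p => d.insert p.2 p.1) PySem.Dict.empty
  documents.foldl (fun tm doc =>
    tm ++ [(PySem.Str.split₀ doc).foldl
      (fun v w => if word_index.contains w then PySem.List.pySetD v (word_index.getD w 0) 1 else v)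
      (List.replicate unique_words.length 0)]) []

-- ===== PORT B =====
def build_term_matrix_alt (documents : List String) : List (List Int) :=
  let unique_words : List String :=
    PySem.List.sorted
      (PySem.Set.ofList (documents.flatMap (fun doc => PySem.Str.split₀ doc))) (fun w => w) false
  documents.map (fun doc =>
    let doc_words : PySem.Set String := PySem.Set.ofList (PySem.Str.split₀ doc)
    unique_words.map (fun w => if doc_words.contains w then (1 : Int) else 0))

-- ===== PRECONDITION & SPEC =====
def Spec_build_term_matrix (documents : List String) (out : List (List Int)) : Prop := out = build_term_matrix_alt documents
instance (documents : List String) (out : List (List Int)) : Decidable (Spec_build_term_matrix documents out) := by unfold Spec_build_term_matrix; infer_instance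

-- ===== CLAIM (what is proved, stated in full; the proofs are below) =====
def Claim_equal_build_term_matrix : Prop := ∀ (documents : List String), Dom_build_term_matrix documents → Spec_build_term_matrix documents (build_term_matrix documents)

-- ===== LEMMAS AND PROOFS =====

-- The dict {word: i for i, word in enumerate(V)} looks up the position of a word in a nodup V.
theorem dict_enum_get? (V : List String) (hn : V.Nodup) :
    ∀ (s : Int) (d0 : PySem.Dict String Int) (u : String),
      ((PySem.List.enumerate V s).foldl (fun d p => d.insert p.2 p.1) d0).get? u
        = if u ∈ V then some (s + (V.idxOf u : Int)) else d0.get? u := by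
  induction V with
  | nil => intro s d0 u; simp [PySem.List.enumerate]
  | cons v t ih =>
    intro s d0 u
    rw [PySem.List.enumerate_cons]
    simp only [List.foldl_cons]
    rcases List.nodup_cons.mp hn with ⟨hv, ht⟩
    rw [ih ht (s + 1) (d0.insert v s) u]
    by_cases huv : u = v
    · subst huv
      simp [hv, List.idxOf_cons_self]
    · by_cases hut : u ∈ t
      · simp [hut, huv, List.idxOf_cons_ne _ (by simpa using (Ne.symm huv))]
        omega
      · simp [hut, huv, PySem.Dict.get?_insert]

-- The scattered row equals the membership row, elementwise, over words all drawn from V.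
theorem scatter_row (V : List String) (hn : V.Nodup)
    (wi : PySem.Dict String Int)
    (hc : ∀ w ∈ V, wi.contains w = true)
    (hg : ∀ j (h : j < V.length), wi.getD V[j] 0 = (j : Int)) :
    ∀ (words : List String) (v0 : List Int), v0.length = V.length →
      (∀ w ∈ words, w ∈ V) →
      (words.foldl (fun v w => if wi.contains w then PySem.List.pySetD v (wi.getD w 0) 1 else v) v0).length = V.length ∧
      ∀ i (h : i < V.length),
        (words.foldl (fun v w => if wi.contains w then PySem.List.pySetD v (wi.getD w 0) 1 else v) v0).getD i 0 =
          if V[i] ∈ words then 1 else v0.getD i 0 := by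
  intro words
  induction words with
  | nil => intro v0 hlen _; simp [hlen]
  | cons w ws ih =>
    intro v0 hlen hmem
    have hwV : w ∈ V := hmem w (List.mem_cons_self)
    have hcw := hc w hwV
    obtain ⟨j, hj, hVj⟩ := List.mem_iff_getElem.mp hwV
    have hgw : wi.getD w 0 = (j : Int) := by rw [← hVj]; exact hg j hj
    simp only [List.foldl_cons, hcw, if_true, hgw]
    have hset : PySem.List.pySetD v0 (j : Int) 1 = v0.set j 1 := by
      simp [PySem.List.pySetD_natCast]
    have hlen1 : (v0.set j 1).length = V.length := by simpa using hlen
    obtain ⟨hl, hi⟩ := ih (v0.set j 1) hlen1 (fun x hx => hmem x (List.mem_cons_of_mem _ hx))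
    rw [hset]
    refine ⟨hl, ?_⟩
    intro i h
    rw [hi i h]
    have hjv : j < v0.length := by omega
    have hsetD : (v0.set j 1).getD i 0 = if i = j then 1 else v0.getD i 0 := by
      simp only [List.getD_eq_getElem?_getD, List.getElem?_set]
      by_cases hij : i = j
      · simp [hij, hjv]
      · have hji' : j ≠ i := fun he => hij he.symm
        simp [hij, hji']
    by_cases hiw : V[i]'h ∈ ws
    · simp [hiw]
    · have hji : V[i]'h = w ↔ i = j := by
        constructor
        · intro he
          exact (List.Nodup.getElem_inj_iff hn).mp (by rw [he, hVj])
        · intro he; subst he; exact hVj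
      simp only [List.mem_cons, hiw, or_false]
      rw [hsetD]
      simp only [hji]
      simp

theorem build_term_matrix_spec : Claim_equal_build_term_matrix := by
  intro documents _
  unfold Spec_build_term_matrix build_term_matrix build_term_matrix_alt
  simp only []
  -- shared vocabulary
  have hset : documents.foldl (fun s doc => PySem.Set.update s (PySem.Str.split₀ doc)) PySem.Set.empty
      = PySem.Set.ofList (documents.flatMap (fun doc => PySem.Str.split₀ doc)) := by
    rw [PySem.Set.ofList_eq_foldl, List.foldl_flatMap]
    rfl
  rw [hset]
  set U : PySem.Set String := PySem.Set.ofList (documents.flatMap (fun doc => PySem.Str.split₀ doc)) with hU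
  set V : List String := PySem.List.sorted U (fun w => w) false with hV
  have hUnodup : U.Nodup := by rw [hU]; exact PySem.Set.nodup_ofList _
  have hnV : V.Nodup := (PySem.List.sorted_perm U (fun w => w) false).symm.nodup hUnodup
  set wi : PySem.Dict String Int :=
    (PySem.List.enumerate V).foldl (fun d p => d.insert p.2 p.1) PySem.Dict.empty with hwi
  have hget : ∀ u ∈ V, wi.get? u = some ((V.idxOf u : Int)) := by
    intro u hu
    rw [hwi, dict_enum_get? V hnV 0 PySem.Dict.empty u]
    simp [hu]
  have hc : ∀ w ∈ V, wi.contains w = true := by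
    intro w hw
    rw [PySem.Dict.contains_eq_isSome_get?, hget w hw]; rfl
  have hg : ∀ j (h : j < V.length), wi.getD V[j] 0 = (j : Int) := by
    intro j h
    have hm : V[j] ∈ V := List.getElem_mem h
    rw [PySem.Dict.getD, hget _ hm]
    simp [List.Nodup.idxOf_getElem hnV]
  rw [PySem.List.foldl_append_singleton_eq_map]
  simp only [List.nil_append]
  apply List.map_congr_left
  intro doc hdoc
  have hmemV : ∀ w ∈ PySem.Str.split₀ doc, w ∈ V := by
    intro w hw
    rw [hV, PySem.List.mem_sorted, hU]
    exact (PySem.Set.mem_ofList _ _).mpr (List.mem_flatMap.mpr ⟨doc, hdoc, hw⟩)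
  obtain ⟨hl, hi⟩ := scatter_row V hnV wi hc hg (PySem.Str.split₀ doc)
    (List.replicate V.length 0) (by simp) hmemV
  apply List.ext_getElem (by simpa using hl)
  intro i h1 h2
  have hiV : i < V.length := by simpa using h2
  have := hi i hiV
  rw [List.getD_eq_getElem?_getD, List.getElem?_eq_getElem h1] at this
  simp only [Option.getD_some] at this
  rw [this]
  rw [List.getElem_map]
  have hcont : (PySem.Set.ofList (PySem.Str.split₀ doc)).contains (V[i]'hiV)
      = decide (V[i]'hiV ∈ PySem.Str.split₀ doc) := by
    simp [PySem.Set.contains, PySem.Set.mem_ofList]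
  rw [hcont]
  by_cases hmem : V[i]'hiV ∈ PySem.Str.split₀ doc
  · simp [hmem]
  · simp [hmem]
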